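-- pv_equiv track=rewrite | github.com/Zhang-Shubo/CPP_programming | leetcode/sort/negative_first.py | negative_first
-- ===== SOURCE A (Python) =====
-- def negative_first(array):
--     i = j = 0
--     while j < len(array):
--         if array[j] < 0:
--             tj = j
--             for x in range(j-1, i-1, -1):
--                 array[x], array[tj] = array[tj], array[x]
--                 tj -= 1
--             i += 1
--         j += 1
--     return array
-- ===== SOURCE B (Python) =====
-- def negative_first(array):
--     negatives = [x for x in array if x < 0]
--     non_negatives = [x for x in array if x >= 0]
--     return negatives + non_negatives
-- ===== Notes on version B (the rewrite author's own statement) =====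
-- stated objective: faster
-- what changed: Replaced the in-place backward-swap rotation for each negative element (quadratic) by a single pass splitting into a negatives list and a non-negatives list and concatenating; A mutates its argument in place, B does not (return value is identical).
import Mathlib
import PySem

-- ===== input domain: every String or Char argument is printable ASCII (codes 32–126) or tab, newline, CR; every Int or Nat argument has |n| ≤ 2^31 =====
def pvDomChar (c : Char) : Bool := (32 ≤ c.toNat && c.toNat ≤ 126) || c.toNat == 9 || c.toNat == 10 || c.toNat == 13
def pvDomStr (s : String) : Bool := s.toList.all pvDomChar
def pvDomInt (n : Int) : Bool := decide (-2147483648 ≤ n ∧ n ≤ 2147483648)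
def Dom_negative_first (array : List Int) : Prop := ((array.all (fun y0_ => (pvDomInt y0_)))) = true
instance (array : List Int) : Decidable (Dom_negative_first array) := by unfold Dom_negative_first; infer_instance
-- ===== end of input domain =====

-- B replaces A's quadratic in-place backward-swap rotation by one linear pass into two lists
-- (negatives, non-negatives) that are concatenated (objective: faster, asymptotic). A mutates
-- its argument in place; the equivalence proved here is about the RETURN value only.

-- ===== PORT A =====
-- inner 'for x in range(j-1, i-1, -1)' body: swap array[x], array[tj]; tj -= 1
-- (indices produced by A's loops are always in range, so pyGetD's default 0 is never read)
def nfSwapStep (s : List Int × Int) (x : Int) : List Int × Int :=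
  let arr := s.1
  let tj := s.2
  let ax := PySem.List.pyGetD arr x 0
  let atj := PySem.List.pyGetD arr tj 0
  (PySem.List.pySetD (PySem.List.pySetD arr x atj) tj ax, tj - 1)

-- the 'while j < len(array)' loop; fuel only makes the recursion structural (set to array length)
def nfLoop (arr : List Int) (i j : Nat) : Nat → List Int
  | 0 => arr
  | fuel + 1 =>
    if j < arr.length then
      if PySem.List.pyGetD arr (j : Int) 0 < 0 then
        let arr' := ((PySem.List.pyRange ((j : Int) - 1) ((i : Int) - 1) (-1)).foldl
          nfSwapStep (arr, (j : Int))).1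
        nfLoop arr' (i + 1) (j + 1) fuel
      else nfLoop arr i (j + 1) fuel
    else arr

def negative_first (array : List Int) : List Int :=
  nfLoop array 0 0 array.length

-- ===== PORT B =====
def negative_first_alt (array : List Int) : List Int :=
  array.filter (fun x => decide (x < 0)) ++ array.filter (fun x => decide (0 ≤ x))

-- ===== PRECONDITION & SPEC =====
def Spec_negative_first (array : List Int) (out : List Int) : Prop := out = negative_first_alt array
instance (array : List Int) (out : List Int) : Decidable (Spec_negative_first array out) := by unfold Spec_negative_first; infer_instance

-- ===== CLAIM (what is proved, stated in full; the proofs are below) =====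
def Claim_equal_negative_first : Prop := ∀ (array : List Int), Dom_negative_first array → Spec_negative_first array (negative_first array)

-- ===== LEMMAS AND PROOFS =====

-- reading the element sitting right after a prefix u
lemma nf_getD_mid (u w : List Int) (v d : Int) : (u ++ v :: w).getD u.length d = v := by
  induction u with
  | nil => rfl
  | cons a u ih => simp

-- writing the element sitting right after a prefix u
lemma nf_set_mid (u w : List Int) (v x : Int) : (u ++ v :: w).set u.length x = u ++ x :: w := by
  induction u with
  | nil => rfl
  | cons a u ih => simp [ih]

-- one adjacent swap at position x = u.length exchanges the two cells after u
lemma nf_swap_adjacent (u w : List Int) (q a : Int) (x t : Int)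
    (hx : x = (u.length : Int)) (ht : t = x + 1) :
    nfSwapStep (u ++ q :: a :: w, t) x = (u ++ a :: q :: w, x) := by
  subst ht; subst hx
  have h1 : ((u.length : Int) + 1) = ((u.length + 1 : Nat) : Int) := by push_cast; ring
  simp only [nfSwapStep, h1, PySem.List.pyGetD_natCast, PySem.List.pySetD_natCast,
    Prod.mk.injEq]
  refine ⟨?_, by push_cast; ring⟩
  have hg1 : (u ++ q :: a :: w).getD u.length 0 = q := nf_getD_mid u (a :: w) q 0
  have hg2 : (u ++ q :: a :: w).getD (u.length + 1) 0 = a := by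
    simp
  rw [hg1, hg2, nf_set_mid u (a :: w) q a]
  simp

-- the inner for-loop rotates a from position P.length + Q.length back to position P.length
lemma nf_rotate (Q : List Int) : ∀ (P rest : List Int) (a : Int),
    ((PySem.List.pyRange ((P.length : Int) + (Q.length : Int) - 1) ((P.length : Int) - 1) (-1)).foldl
        nfSwapStep (P ++ Q ++ a :: rest, (P.length : Int) + (Q.length : Int))).1 =
      P ++ a :: Q ++ rest := by
  induction Q using List.reverseRecOn with
  | nil =>
    intro P rest a
    rw [show (P.length : Int) + (([] : List Int).length : Int) - 1 = (P.length : Int) - 1 by simp,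
      PySem.List.pyRange_neg_one_eq_nil le_rfl]
    simp
  | append_singleton Q q ih =>
    intro P rest a
    rw [show (P.length : Int) + (((Q ++ [q]) : List Int).length : Int) - 1
          = (P.length : Int) + (Q.length : Int) by push_cast [List.length_append, List.length_cons, List.length_nil]; ring,
      show (P.length : Int) + (((Q ++ [q]) : List Int).length : Int)
          = (P.length : Int) + (Q.length : Int) + 1 by push_cast [List.length_append, List.length_cons, List.length_nil]; ring,
      show P ++ (Q ++ [q]) ++ a :: rest = (P ++ Q) ++ q :: a :: rest by simp,
      PySem.List.pyRange_neg_one_cons (by omega)]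
    simp only [List.foldl_cons]
    rw [nf_swap_adjacent (P ++ Q) rest q a _ _ (by push_cast [List.length_append]; ring) rfl,
      show (P ++ Q) ++ a :: q :: rest = P ++ Q ++ a :: (q :: rest) by simp,
      ih P (q :: rest) a]
    simp

-- main invariant for the while loop: processed prefix is P (negatives) then Q (non-negatives)
lemma nf_loop_inv (R : List Int) : ∀ (P Q : List Int) (fuel : Nat),
    (∀ x ∈ Q, ¬ x < 0) → R.length ≤ fuel →
    nfLoop (P ++ Q ++ R) P.length (P.length + Q.length) fuel =
      P ++ R.filter (fun x => decide (x < 0)) ++ Q ++ R.filter (fun x => decide (0 ≤ x)) := by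
  induction R with
  | nil =>
    intro P Q fuel hQ hf
    cases fuel with
    | zero => simp [nfLoop]
    | succ f =>
      simp only [nfLoop]
      rw [if_neg (by simp)]
      simp
  | cons a R ih =>
    intro P Q fuel hQ hf
    cases fuel with
    | zero => simp at hf
    | succ f =>
      have hf' : R.length ≤ f := by simp only [List.length_cons] at hf; omega
      simp only [nfLoop]
      rw [if_pos (by simp only [List.length_append, List.length_cons]; omega)]
      have hget : PySem.List.pyGetD (P ++ Q ++ a :: R) ((P.length + Q.length : Nat) : Int) 0 = a := by
        rw [PySem.List.pyGetD_natCast]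
        simp
      rw [hget]
      by_cases ha : a < 0
      · rw [if_pos ha]
        rw [show ((P.length + Q.length : Nat) : Int) - 1
              = (P.length : Int) + (Q.length : Int) - 1 by push_cast; ring,
          show ((P.length + Q.length : Nat) : Int) = (P.length : Int) + (Q.length : Int) by push_cast [List.length_append, List.length_cons, List.length_nil]; ring,
          nf_rotate Q P R a]
        have hI := ih (P ++ [a]) Q f hQ hf'
        simp only [List.length_append, List.length_cons, List.length_nil] at hI
        have hI' : nfLoop (P ++ a :: Q ++ R) (P.length + 1) (P.length + Q.length + 1) f =
            (P ++ [a]) ++ R.filter (fun x => decide (x < 0)) ++ Q ++ R.filter (fun x => decide (0 ≤ x)) := by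
          have harr : (P ++ [a]) ++ Q ++ R = P ++ a :: Q ++ R := by simp
          have hjj : P.length + 0 + 1 + Q.length = P.length + Q.length + 1 := by omega
          rw [harr, hjj] at hI
          rw [show P.length + 1 = P.length + 0 + 1 by omega]
          exact hI
        rw [hI']
        simp [ha, not_le.mpr ha]
      · rw [if_neg ha]
        have hQ' : ∀ x ∈ Q ++ [a], ¬ x < 0 := by
          intro x hx
          rcases List.mem_append.mp hx with h | h
          · exact hQ x h
          · simp at h; omega
        have hI := ih P (Q ++ [a]) f hQ' hf'
        simp only [List.length_append, List.length_cons, List.length_nil] at hI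
        have harr : P ++ (Q ++ [a]) ++ R = P ++ Q ++ a :: R := by simp
        have hjj : P.length + (Q.length + 0 + 1) = P.length + Q.length + 1 := by omega
        rw [harr, hjj] at hI
        rw [hI]
        have ha' : 0 ≤ a := not_lt.mp ha
        simp [ha, ha', List.append_assoc]

-- ===== VERDICT (by name: the statement is the Claim_ definition above) =====
theorem negative_first_spec : Claim_equal_negative_first := by
  intro array _
  unfold Spec_negative_first negative_first negative_first_alt
  have := nf_loop_inv array [] [] array.length (by simp) (le_refl _)
  simpa using this
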